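-- pv_equiv track=rewrite | github.com/SagarDhok/CodeDaily | GeeksOfGeeks/day-119.py | minSoldiers
-- ===== SOURCE A (Python) =====
-- import math
--
-- def minSoldiers(arr, k):
--    required = math.ceil( len(arr)/2)
--
--    lucky = 0
--    add_list = []
--
--
--    for x in arr:
--           if x % k == 0:
--             lucky += 1
--           else:
--               add_list.append(k - (x % k))
--
--    if lucky >= required:
--     return 0
--
--    add_list.sort()
--    soldiers_needed = sum(add_list[:required - lucky])
--    return soldiers_needed
-- ===== SOURCE B (Python) =====
-- def _sum_smallest(xs, m):
--     # sum of the m smallest elements of xs by three-way partition selection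
--     # (quickselect-style; no sorting)
--     if m >= len(xs):
--         return sum(xs)
--     p = xs[0]
--     lo = [x for x in xs if x < p]
--     eq = [x for x in xs if x == p]
--     hi = [x for x in xs if x > p]
--     if m <= len(lo):
--         return _sum_smallest(lo, m)
--     if m <= len(lo) + len(eq):
--         return sum(lo) + (m - len(lo)) * p
--     return sum(lo) + len(eq) * p + _sum_smallest(hi, m - len(lo) - len(eq))
--
-- def minSoldiers(arr, k):
--     need = (len(arr) + 1) // 2
--     adds = [k - x % k for x in arr if x % k != 0]
--     m = need - (len(arr) - len(adds))
--     if m <= 0: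
--         return 0
--     return _sum_smallest(adds, m)
-- ===== Notes on version B (the rewrite author's own statement) =====
-- stated objective: alternative
-- what changed: Replaces A's build-all-additions + full sort + prefix-sum by a quickselect-style recursive three-way partition that computes the sum of the m smallest additions directly, without ever sorting.
import Mathlib
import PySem

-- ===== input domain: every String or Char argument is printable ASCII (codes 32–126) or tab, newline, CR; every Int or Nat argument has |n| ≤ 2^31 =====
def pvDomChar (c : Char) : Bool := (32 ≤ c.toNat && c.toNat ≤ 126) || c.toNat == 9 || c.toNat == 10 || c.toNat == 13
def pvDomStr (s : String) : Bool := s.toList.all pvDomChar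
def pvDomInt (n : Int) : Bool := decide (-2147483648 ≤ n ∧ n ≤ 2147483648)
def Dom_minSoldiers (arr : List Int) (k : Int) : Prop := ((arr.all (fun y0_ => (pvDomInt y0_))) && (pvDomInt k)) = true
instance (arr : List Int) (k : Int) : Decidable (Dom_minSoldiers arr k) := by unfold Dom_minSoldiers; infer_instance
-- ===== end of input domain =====

-- B replaces A's full sort + prefix-sum by a quickselect-style recursive three-way-partition
-- selection (sum of the m smallest additions without ever sorting); alternative algorithm.

-- ===== PORT A =====
def minSoldiers (arr : List Int) (k : Int) : Int :=
  -- math.ceil(len(arr)/2): the float ceil is exact for any realizable list length; ported as (n+1)//2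
  let required : Int := PySem.Int.floordiv ((arr.length : Int) + 1) 2
  let st := arr.foldl
    (fun (st : Int × List Int) x =>
      if PySem.Int.mod x k = 0 then (st.1 + 1, st.2)
      else (st.1, st.2 ++ [k - PySem.Int.mod x k]))
    (0, [])
  if st.1 ≥ required then 0
  else (PySem.List.slice (PySem.List.sorted st.2 (fun a => a) false) none (some (required - st.1))).sum

-- ===== PORT B =====
-- helper for termination of sumSmallest (cited by decreasing_by)
theorem pv_filter_cons_head_lt {p : Int} {t : List Int} (q : Int → Bool) (hq : q p = false) :
    ((p :: t).filter q).length < (p :: t).length := by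
  simp only [List.filter_cons, hq, List.length_cons]
  exact Nat.lt_succ_of_le (List.length_filter_le ..)

-- sum of the m smallest elements of xs by recursive three-way partition selection (Source B's _sum_smallest)
def sumSmallest (xs : List Int) (m : Int) : Int :=
  if (xs.length : Int) ≤ m then xs.sum
  else
    match xs with
    | [] => 0
    | p :: t =>
      let lo := (p :: t).filter (fun x => decide (x < p))
      let eq := (p :: t).filter (fun x => decide (x = p))
      let hi := (p :: t).filter (fun x => decide (p < x))
      if m ≤ (lo.length : Int) then sumSmallest lo m
      else if m ≤ (lo.length : Int) + (eq.length : Int) then lo.sum + (m - lo.length) * p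
      else lo.sum + (eq.length : Int) * p + sumSmallest hi (m - lo.length - eq.length)
termination_by xs.length
decreasing_by
  · exact pv_filter_cons_head_lt _ (by simp)
  · exact pv_filter_cons_head_lt _ (by simp)

def minSoldiers_alt (arr : List Int) (k : Int) : Int :=
  let need : Int := PySem.Int.floordiv ((arr.length : Int) + 1) 2
  let adds := (arr.filter (fun x => decide (¬ PySem.Int.mod x k = 0))).map (fun x => k - PySem.Int.mod x k)
  let m := need - ((arr.length : Int) - (adds.length : Int))
  if m ≤ 0 then 0 else sumSmallest adds m

-- ===== PRECONDITION & SPEC =====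
-- Pre_ excludes exactly the inputs where Python A raises: k = 0 with a nonempty arr (ZeroDivisionError in x % k).
def Pre_minSoldiers (arr : List Int) (k : Int) : Prop := k ≠ 0 ∨ arr = []
instance (arr : List Int) (k : Int) : Decidable (Pre_minSoldiers arr k) := by unfold Pre_minSoldiers; infer_instance
def pvWitness_minSoldiers : List Int × Int := ([3, 5, 6, 7, 9], 3)

def Spec_minSoldiers (arr : List Int) (k : Int) (out : Int) : Prop := out = minSoldiers_alt arr k
instance (arr : List Int) (k : Int) (out : Int) : Decidable (Spec_minSoldiers arr k out) := by unfold Spec_minSoldiers; infer_instance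

-- ===== CLAIM (what is proved, stated in full; the proofs are below) =====
def Claim_equal_minSoldiers : Prop := ∀ (arr : List Int) (k : Int), Dom_minSoldiers arr k → Pre_minSoldiers arr k → Spec_minSoldiers arr k (minSoldiers arr k)

-- ===== LEMMAS AND PROOFS =====

-- sumSmallest xs m computes the sum of the first m elements of sorted(xs)
theorem sumSmallest_eq_take_sorted :
    ∀ (n : Nat) (xs : List Int), xs.length ≤ n → ∀ (m : Int),
      sumSmallest xs m = ((PySem.List.sorted xs (fun x => x) false).take m.toNat).sum := by
  intro n
  induction n with
  | zero =>
    intro xs hlen m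
    have hx : xs = [] := List.eq_nil_of_length_eq_zero (by omega)
    subst hx
    rw [sumSmallest.eq_def]
    have h0 : PySem.List.sorted ([] : List Int) (fun x => x) false = [] := rfl
    simp [h0]
  | succ n ih =>
    intro xs hlen m
    rw [sumSmallest.eq_def]
    by_cases hm : (xs.length : Int) ≤ m
    · rw [if_pos hm]
      rw [List.take_of_length_le (by rw [PySem.List.length_sorted]; omega)]
      exact ((PySem.List.sorted_perm ..).sum_eq).symm
    · rw [if_neg hm]
      match xs, hlen, hm with
      | [], _, hm =>
        simp [show PySem.List.sorted ([] : List Int) (fun x => x) false = [] from rfl]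
      | p :: t, hlen, hm =>
        simp only
        set lo := (p :: t).filter (fun x => decide (x < p)) with hlo
        set eq := (p :: t).filter (fun x => decide (x = p)) with heq
        set hi := (p :: t).filter (fun x => decide (p < x)) with hhi
        -- the three parts permute the list
        have hperm : (lo ++ (eq ++ hi)).Perm (p :: t) := by
          have h1 := List.filter_append_perm (fun x => decide (x < p)) (p :: t)
          have h2 := List.filter_append_perm (fun x => decide (x = p))
            ((p :: t).filter (fun x => !decide (x < p)))
          have e1 : ((p :: t).filter (fun x => !decide (x < p))).filter (fun x => decide (x = p)) = eq := by
            rw [List.filter_filter, heq]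
            apply List.filter_congr; intro x _
            by_cases h : x = p <;> simp [h]
          have e2 : ((p :: t).filter (fun x => !decide (x < p))).filter (fun x => !decide (x = p)) = hi := by
            rw [List.filter_filter, hhi]
            apply List.filter_congr; intro x _
            by_cases h1 : x = p
            · simp [h1]
            · by_cases h2 : p < x <;> simp [h1, h2] <;> omega
          rw [e1, e2] at h2
          exact ((List.Perm.refl lo).append h2).trans h1
        have hmemlo : ∀ a ∈ lo, a < p := by
          intro a ha; rw [hlo, List.mem_filter] at ha; simpa using ha.2
        have hmemeq : ∀ a ∈ eq, a = p := by
          intro a ha; rw [heq, List.mem_filter] at ha; simpa using ha.2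
        have hmemhi : ∀ a ∈ hi, p < a := by
          intro a ha; rw [hhi, List.mem_filter] at ha; simpa using ha.2
        -- sorted(p :: t) is sorted lo ++ eq ++ sorted hi
        have hS : PySem.List.sorted (p :: t) (fun x => x) false
            = PySem.List.sorted lo (fun x => x) false ++ (eq ++ PySem.List.sorted hi (fun x => x) false) := by
          apply PySem.List.sorted_id_eq_of_perm_of_pairwise
          · exact ((PySem.List.sorted_perm ..).append
              ((List.Perm.refl eq).append (PySem.List.sorted_perm ..))).trans hperm
          · rw [List.pairwise_append]
            refine ⟨PySem.List.sorted_pairwise .., ?_, ?_⟩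
            · rw [List.pairwise_append]
              refine ⟨List.pairwise_of_forall_mem_list (fun a ha b hb => ?_),
                PySem.List.sorted_pairwise .., fun a ha b hb => ?_⟩
              · rw [hmemeq a ha, hmemeq b hb]
              · rw [hmemeq a ha]
                exact le_of_lt (hmemhi b ((PySem.List.mem_sorted ..).mp hb))
            · intro a ha b hb
              have ha' := hmemlo a ((PySem.List.mem_sorted ..).mp ha)
              rcases List.mem_append.mp hb with hb | hb
              · rw [hmemeq b hb]; omega
              · have := hmemhi b ((PySem.List.mem_sorted ..).mp hb); omega
        have hlolen : (PySem.List.sorted lo (fun x => x) false).length = lo.length :=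
          PySem.List.length_sorted ..
        have hlosum : (PySem.List.sorted lo (fun x => x) false).sum = lo.sum :=
          (PySem.List.sorted_perm ..).sum_eq
        have hlo_lt : lo.length < (p :: t).length := pv_filter_cons_head_lt _ (by simp)
        have hhi_lt : hi.length < (p :: t).length := pv_filter_cons_head_lt _ (by simp)
        have heqrep : eq = List.replicate eq.length p := List.eq_replicate_of_mem hmemeq
        rw [hS, List.take_append, hlolen]
        by_cases h1 : m ≤ (lo.length : Int)
        · rw [if_pos h1, ih lo (by omega) m]
          have h0 : m.toNat - lo.length = 0 := by omega
          simp [h0]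
        · rw [if_neg h1]
          have hmn : lo.length < m.toNat := by omega
          rw [List.take_of_length_le (le_of_lt (by omega)), List.sum_append, hlosum]
          by_cases h2 : m ≤ (lo.length : Int) + (eq.length : Int)
          · rw [if_pos h2]
            have hj : m.toNat - lo.length ≤ eq.length := by omega
            rw [List.take_append]
            have h0 : m.toNat - lo.length - eq.length = 0 := by omega
            rw [h0, List.take_zero, List.append_nil]
            conv_rhs => rw [heqrep]
            rw [List.take_replicate, List.sum_replicate]
            have hmin : min (m.toNat - lo.length) eq.length = m.toNat - lo.length := by omega
            rw [hmin, nsmul_eq_mul]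
            have hcast : ((m.toNat - lo.length : Nat) : Int) = m - (lo.length : Int) := by omega
            rw [hcast]
          · rw [if_neg h2, List.take_append]
            rw [List.take_of_length_le (le_of_lt (by omega))]
            rw [ih hi (by omega) (m - lo.length - eq.length)]
            have ht : (m - (lo.length : Int) - (eq.length : Int)).toNat
                = m.toNat - lo.length - eq.length := by omega
            rw [ht, List.sum_append]
            conv_rhs => rw [heqrep]
            rw [List.sum_replicate, nsmul_eq_mul, List.length_replicate, add_assoc]

-- ===== VERDICT (by name: the statement is the Claim_ definition above) =====
theorem minSoldiers_spec : Claim_equal_minSoldiers := by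
  intro arr k _ _
  unfold Spec_minSoldiers minSoldiers minSoldiers_alt
  simp only
  set P : Int → Prop := fun x => PySem.Int.mod x k = 0 with hP
  set f : Int → Int := fun x => k - PySem.Int.mod x k with hf
  set required : Int := PySem.Int.floordiv ((arr.length : Int) + 1) 2 with hreq
  have hbodyA : (fun (st : Int × List Int) x =>
      if PySem.Int.mod x k = 0 then (st.1 + 1, st.2) else (st.1, st.2 ++ [k - PySem.Int.mod x k]))
      = (fun (st : Int × List Int) x =>
      (if P x then st.1 + 1 else st.1, if ¬ P x then st.2 ++ [f x] else st.2)) := by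
    funext st x; by_cases h : P x <;> simp [hP, hf] at h ⊢ <;> simp [h]
  rw [hbodyA, PySem.List.foldl_prod_mk (f := fun (a : Int) x => if P x then a + 1 else a)
    (g := fun (acc : List Int) x => if ¬ P x then acc ++ [f x] else acc)]
  set adds : List Int := (arr.filter (fun x => decide (¬ P x))).map f with hadds
  have haddlist : arr.foldl (fun acc x => if ¬ P x then acc ++ [f x] else acc) [] = adds := by
    rw [PySem.List.foldl_append_ite (p := fun x => ¬ P x) f, List.nil_append]
  have hlucky : arr.foldl (fun (a : Int) x => if P x then a + 1 else a) 0
      = (arr.length : Int) - (adds.length : Int) := by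
    rw [PySem.List.foldl_ite_add_one]
    have h1 := List.length_eq_length_filter_add (l := arr) (fun x => decide (P x))
    have hc : arr.countP (fun x => decide (P x)) = (arr.filter (fun x => decide (P x))).length :=
      (List.countP_eq_length_filter ..)
    have hlen : adds.length = (arr.filter (fun x => decide (¬ P x))).length := by
      simp [hadds]
    have hnot : (arr.filter (fun x => decide (¬ P x))).length
        = (arr.filter (fun x => !decide (P x))).length := by
      congr 1; apply List.filter_congr; intro x _; by_cases h : P x <;> simp [h]
    rw [hlen, hnot]
    omega
  rw [haddlist, hlucky]
  by_cases hge : (arr.length : Int) - (adds.length : Int) ≥ required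
  · rw [if_pos hge, if_pos (by omega)]
  · rw [if_neg hge, if_neg (by omega)]
    rw [sumSmallest_eq_take_sorted adds.length adds le_rfl]
    rw [PySem.List.slice_to _ (by omega)]
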